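-- pv_equiv track=rewrite | github.com/ElectricPotato/AdventOfCode | 2025/day03/sol_serial.py | partB_serial_one_line
-- ===== SOURCE A (Python) =====
-- def partB_serial_one_line(line):
--     total_digits = 12
--
--     buffer = [0] * total_digits
--     while len(line) > 0:
--         line_digit = line.pop(0)
--         for digit_idx in range(total_digits):
--             if digit_idx != total_digits - 1:
--                 next_buffer_value = buffer[digit_idx + 1]
--             else:
--                 next_buffer_value = line_digit
--
--             if buffer[digit_idx] < next_buffer_value:
--                 buffer.pop(digit_idx)
--                 buffer.append(line_digit)
--                 break
--
--     result = 0
--     for digit_idx in range(total_digits):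
--         result = result * 10 + buffer[digit_idx]
--
--     return result
-- ===== SOURCE B (Python) =====
-- def partB_serial_one_line(line):
--     # Per-position greedy selection of the best 12-term subsequence of the
--     # zero-padded stream (A instead shuffles a 12-slot buffer per digit).
--     # Like A, it leaves `line` empty on return.
--     s = [0] * 12 + line
--     del line[:]
--     picked = []
--     k = 12
--     i = 0
--     while k > 0:
--         if len(s) - i == k:
--             picked.extend(s[i:])
--             break
--         x = s[i]
--         if all(s[j] <= x for j in range(i + 1, len(s) - k + 1)):
--             picked.append(x)
--             k -= 1
--         i += 1
--     r = 0
--     for x in picked: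
--         r = r * 10 + x
--     return r
-- ===== Notes on version B (the rewrite author's own statement) =====
-- stated objective: faster
-- what changed: B replaces A's per-digit 12-slot buffer shuffle driven by a quadratic line.pop(0) drain with a per-position greedy selection: it pads the stream with twelve zeros and, scanning once with a window bound, picks each of the 12 output digits as the leftmost maximum that still leaves enough digits to the right.
import Mathlib
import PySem

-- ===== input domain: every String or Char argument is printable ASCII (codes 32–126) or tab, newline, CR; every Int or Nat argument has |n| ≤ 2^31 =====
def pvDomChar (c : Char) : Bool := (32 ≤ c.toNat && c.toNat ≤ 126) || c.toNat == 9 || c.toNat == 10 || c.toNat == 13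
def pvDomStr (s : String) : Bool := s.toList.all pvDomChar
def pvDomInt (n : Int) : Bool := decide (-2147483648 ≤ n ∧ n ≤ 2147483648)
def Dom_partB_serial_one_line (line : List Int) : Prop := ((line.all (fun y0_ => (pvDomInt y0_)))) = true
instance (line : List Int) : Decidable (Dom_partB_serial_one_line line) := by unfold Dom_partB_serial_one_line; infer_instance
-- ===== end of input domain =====

-- B rewrites A's per-digit buffer shuffle as a windowed greedy selection of the best
-- 12-digit subsequence of the zero-padded stream (measurably faster: A drains `line`
-- with line.pop(0)); equivalence is about the return value — both empty `line` in Python.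

-- ===== PORT A =====
-- inner `for digit_idx in range(12): ... break` of A (i = digit_idx; returns the new buffer)
def pvAScan (buffer : List Int) (d : Int) (i : Nat) : List Int :=
  if _h : i < 12 then
    let nxt : Int := if i ≠ 11 then (PySem.List.pyGet? buffer ((i : Int) + 1)).getD 0 else d
    if (PySem.List.pyGet? buffer (i : Int)).getD 0 < nxt then
      buffer.eraseIdx i ++ [d]          -- buffer.pop(digit_idx); buffer.append(line_digit)
    else pvAScan buffer d (i + 1)
  else buffer
termination_by 12 - i

def partB_serial_one_line (line : List Int) : Int :=
  -- while len(line) > 0: line_digit = line.pop(0); <inner scan>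
  let buffer := line.foldl (fun b d => pvAScan b d 0) (List.replicate 12 0)
  -- result loop: for digit_idx in range(12): result = result*10 + buffer[digit_idx]
  (PySem.List.pyRange 0 12 1).foldl
    (fun r i => r * 10 + PySem.List.pyGetD buffer i 0) 0

-- ===== PORT B =====
-- B's while-loop over the suffix of s: keep k more digits; head is picked iff it is ≥
-- every element of the droppable window, else it is dropped.
def pvSelKeep : Nat → List Int → List Int
  | 0, _ => []
  | _ + 1, [] => []
  | k + 1, x :: xs =>
    if xs.length = k then x :: xs                                   -- len(s)-i == k: take the rest
    else if (xs.take (xs.length - k)).all (fun y => y ≤ x) then     -- all(s[j] <= x for j in window)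
      x :: pvSelKeep k xs
    else pvSelKeep (k + 1) xs
termination_by _ t => t.length

def partB_serial_one_line_alt (line : List Int) : Int :=
  let picked := pvSelKeep 12 (List.replicate 12 0 ++ line)
  picked.foldl (fun r x => r * 10 + x) 0

-- ===== PRECONDITION & SPEC =====
def Spec_partB_serial_one_line (line : List Int) (out : Int) : Prop := out = partB_serial_one_line_alt line
instance (line : List Int) (out : Int) : Decidable (Spec_partB_serial_one_line line out) := by unfold Spec_partB_serial_one_line; infer_instance

-- ===== CLAIM (what is proved, stated in full; the proofs are below) =====
def Claim_equal_partB_serial_one_line : Prop := ∀ (line : List Int), Dom_partB_serial_one_line line → Spec_partB_serial_one_line line (partB_serial_one_line line)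

-- ===== LEMMAS AND PROOFS =====

-- "remove the first ascent and append d" — the specification of A's inner scan.
def pvBump : List Int → Int → List Int
  | [], _ => []
  | [x], d => if x < d then [d] else [x]
  | x :: y :: t, d => if x < y then (y :: t) ++ [d] else x :: pvBump (y :: t) d

lemma pvSelKeep_zero (t : List Int) : pvSelKeep 0 t = [] := by cases t <;> simp [pvSelKeep]

lemma pvSelKeep_of_length_eq : ∀ (k : Nat) (t : List Int), t.length = k → pvSelKeep k t = t := by
  intro k t h
  cases t with
  | nil => subst h; simp [pvSelKeep]
  | cons x xs => subst h; simp [pvSelKeep]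

lemma pvSelKeep_length : ∀ (t : List Int) (k : Nat), k ≤ t.length → (pvSelKeep k t).length = k := by
  intro t
  induction t with
  | nil => intro k hk; obtain rfl : k = 0 := Nat.le_zero.mp (by simpa using hk); simp [pvSelKeep]
  | cons x xs ih =>
    intro k hk
    cases k with
    | zero => simp [pvSelKeep]
    | succ k =>
      simp only [pvSelKeep]
      split_ifs with h1 h2
      · simp [h1]
      · simpa using ih k (by simp at hk; omega)
      · exact ih (k + 1) (by simp at hk ⊢; omega)

-- dropping heads that are strictly below an element still inside the window
lemma pvSelKeep_skipLow : ∀ (u : List Int) (k : Nat) (w : Int) (v : List Int),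
    k ≤ v.length + 1 → (∀ y ∈ u, y < w) →
    pvSelKeep k (u ++ w :: v) = pvSelKeep k (w :: v) := by
  intro u
  induction u with
  | nil => intro k w v _ _; rfl
  | cons y u' ih =>
    intro k w v hk hlt
    cases k with
    | zero => simp [pvSelKeep_zero]
    | succ k =>
      have hlen : (u' ++ w :: v).length = u'.length + v.length + 1 := by simp; omega
      have hne : (u' ++ w :: v).length ≠ k := by omega
      have hwin : w ∈ (u' ++ w :: v).take ((u' ++ w :: v).length - k) := by
        have : (u' ++ w :: v).take ((u' ++ w :: v).length - k)
            = u' ++ w :: (v.take (v.length + 1 - k - 1)) := by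
          rw [List.take_append]
          congr 1
          · rw [List.take_of_length_le]; omega
          · rw [List.take_cons (by omega)]
            congr 2
            omega
        rw [this]; simp
      have hfail : ¬ ((u' ++ w :: v).take ((u' ++ w :: v).length - k)).all (fun y_1 => decide (y_1 ≤ y)) = true := by
        simp only [List.all_eq_true]
        intro hall
        have := hall w hwin
        have hy : y < w := hlt y (by simp)
        simp at this; omega
      show pvSelKeep (k + 1) (y :: (u' ++ w :: v)) = _
      rw [pvSelKeep]
      rw [if_neg hne, if_neg hfail]
      exact ih (k + 1) w v hk (fun z hz => hlt z (by simp [hz]))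

-- head decomposition: the first pick is a window maximum
lemma pvSelKeep_headDecomp : ∀ (t : List Int) (k : Nat), k + 1 ≤ t.length →
    ∃ u h v, t = u ++ h :: v ∧ u.length + (k + 1) ≤ t.length ∧
      (∀ y ∈ t.take (t.length - k), y ≤ h) ∧
      pvSelKeep (k + 1) t = h :: pvSelKeep k v := by
  intro t
  induction t with
  | nil => intro k h; simp at h
  | cons x xs ih =>
    intro k hk
    have hkxs : k ≤ xs.length := by simp at hk; omega
    have hm : (x :: xs).length - k = (xs.length - k) + 1 := by simp; omega
    by_cases h1 : xs.length = k
    · refine ⟨[], x, xs, rfl, by simpa using hkxs, ?_, ?_⟩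
      · intro y hy
        rw [hm] at hy
        have : xs.length - k = 0 := by omega
        rw [this] at hy
        simp at hy; omega
      · rw [pvSelKeep, if_pos h1, pvSelKeep_of_length_eq k xs h1]
    · by_cases h2 : (xs.take (xs.length - k)).all (fun y => decide (y ≤ x)) = true
      · refine ⟨[], x, xs, rfl, by simp at hk ⊢; omega, ?_, ?_⟩
        · intro y hy
          rw [hm, List.take_succ_cons] at hy
          rcases List.mem_cons.mp hy with h | h
          · omega
          · have := (List.all_eq_true.mp h2) y h; simpa using this
        · rw [pvSelKeep, if_neg h1, if_pos h2]
      · have hk' : k + 1 ≤ xs.length := by omega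
        obtain ⟨u, h, v, ht, hlen, hwin, heq⟩ := ih k hk'
        have hxh : x ≤ h := by
          simp only [List.all_eq_true] at h2
          push_neg at h2
          obtain ⟨y0, hy0mem, hy0⟩ := h2
          have := hwin y0 hy0mem
          simp at hy0; omega
        refine ⟨x :: u, h, v, by rw [ht]; rfl, by simp at hlen ⊢; omega, ?_, ?_⟩
        · intro y hy
          rw [hm, List.take_succ_cons] at hy
          rcases List.mem_cons.mp hy with h' | h'
          · omega
          · exact hwin y h'
        · rw [pvSelKeep, if_neg h1, if_neg h2]; exact heq

lemma pvBump_cons_of_le (t : List Int) (d : Int) {x y : Int} (h : y ≤ x) :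
    pvBump (x :: y :: t) d = x :: pvBump (y :: t) d := by
  rw [pvBump, if_neg (by omega)]

lemma pvBump_cons_of_lt (t : List Int) (d : Int) {x y : Int} (h : x < y) :
    pvBump (x :: y :: t) d = (y :: t) ++ [d] := by
  rw [pvBump, if_pos h]

lemma pvMemTake : ∀ (u : List Int) (M : Int) (v : List Int) (q : Nat), u.length < q →
    M ∈ (u ++ M :: v).take q := by
  intro u
  induction u with
  | nil =>
    intro M v q hq
    cases q with
    | zero => omega
    | succ q => simp [List.take_succ_cons]
  | cons a u' ih =>
    intro M v q hq
    cases q with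
    | zero => omega
    | succ q =>
      simp only [List.cons_append, List.take_succ_cons, List.mem_cons]
      exact Or.inr (ih M v q (by simpa using hq))

lemma pvTakeSucc : ∀ (u : List Int) (w : Int) (v : List Int),
    (u ++ w :: v).take (u.length + 1) = u ++ [w] := by
  intro u
  induction u with
  | nil => intro w v; simp
  | cons a u' ih => intro w v; simp [List.take_succ_cons, ih w v]

-- the key step lemma: appending one digit = "remove first ascent, append"
lemma pvSelKeep_step : ∀ (s : List Int) (k : Nat) (d : Int), k ≤ s.length →
    pvSelKeep k (s ++ [d]) = pvBump (pvSelKeep k s) d := by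
  intro s
  induction s with
  | nil =>
    intro k d hk
    obtain rfl : k = 0 := Nat.le_zero.mp (by simpa using hk)
    simp [pvSelKeep, pvBump]
  | cons x xs ih =>
    intro k d hk
    cases k with
    | zero => simp [pvSelKeep_zero, pvBump]
    | succ k =>
      have hkxs : k ≤ xs.length := by simp at hk; omega
      have hLne : ¬ ((xs ++ [d]).length = k) := by simp; omega
      by_cases h1 : xs.length = k
      · -- |s| = k+1 : RHS buffer is s itself
        cases xs with
        | nil =>
          obtain rfl : k = 0 := by simpa using h1.symm
          by_cases hdx : d ≤ x
          · have : ¬ (x < d) := by omega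
            simp [pvSelKeep, pvBump, hdx, this]
          · have hxd : x < d := by omega
            simp [pvSelKeep, pvBump, hxd, (by omega : ¬ d ≤ x)]
        | cons y t =>
          have hWD : ((y :: t) ++ [d]).take (((y :: t) ++ [d]).length - k) = [y] := by
            have : ((y :: t) ++ [d]).length - k = 1 := by simp at h1 ⊢; omega
            rw [this]; rfl
          by_cases hyx : y ≤ x
          · show pvSelKeep (k+1) (x :: ((y :: t) ++ [d])) = _
            rw [pvSelKeep, if_neg hLne, hWD, if_pos (by simp [hyx]),
              ih k d (by rw [← h1]), pvSelKeep_of_length_eq k (y :: t) h1]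
            rw [pvSelKeep, if_pos h1, pvBump, if_neg (by omega)]
          · show pvSelKeep (k+1) (x :: ((y :: t) ++ [d])) = _
            rw [pvSelKeep, if_neg hLne, hWD,
              if_neg (by simp; omega),
              pvSelKeep_of_length_eq (k+1) ((y :: t) ++ [d]) (by simp at h1 ⊢; omega)]
            rw [pvSelKeep, if_pos h1, pvBump, if_pos (by omega)]
      · have hk1 : k + 1 ≤ xs.length := by omega
        cases k with
        | zero =>
          -- keep exactly one more digit; the window is the whole rest
          have htrL : ((xs ++ [d]).take ((xs ++ [d]).length - 0)) = xs ++ [d] := by simp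
          have htrR : (xs.take (xs.length - 0)) = xs := by simp
          by_cases hall : xs.all (fun y => decide (y ≤ x)) = true
          · by_cases hdx : d ≤ x
            · have hcL : ((xs ++ [d]).take ((xs ++ [d]).length - 0)).all (fun y => decide (y ≤ x)) = true := by
                rw [htrL]
                simp only [List.all_append, Bool.and_eq_true]
                exact ⟨hall, by simpa using hdx⟩
              show pvSelKeep (0 + 1) (x :: (xs ++ [d])) = pvBump (pvSelKeep (0 + 1) (x :: xs)) d
              rw [pvSelKeep, if_neg hLne, if_pos hcL, pvSelKeep_zero]
              rw [pvSelKeep, if_neg h1, if_pos (by simpa using hall), pvSelKeep_zero,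
                pvBump, if_neg (by omega)]
            · have hxd : x < d := by omega
              obtain ⟨u, h, v, hxseq, _, _, hsel⟩ := pvSelKeep_headDecomp xs 0 hk1
              have hhx : h ≤ x := by
                have hmem : h ∈ xs := by rw [hxseq]; simp
                have := List.all_eq_true.mp hall h hmem; simpa using this
              have hcL : ¬ (((xs ++ [d]).take ((xs ++ [d]).length - 0)).all (fun y => decide (y ≤ x)) = true) := by
                rw [htrL]
                simp only [List.all_append, Bool.and_eq_true]
                intro hc
                have := hc.2; simp at this; omega
              show pvSelKeep (0 + 1) (x :: (xs ++ [d])) = pvBump (pvSelKeep (0 + 1) (x :: xs)) d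
              rw [pvSelKeep, if_neg hLne, if_neg hcL, ih (0 + 1) d hk1, hsel, pvSelKeep_zero]
              rw [pvSelKeep, if_neg h1, if_pos (by simpa using hall), pvSelKeep_zero,
                pvBump, pvBump, if_pos (by omega), if_pos (by omega)]
          · -- head dropped on both sides
            have hcL : ¬ (((xs ++ [d]).take ((xs ++ [d]).length - 0)).all (fun y => decide (y ≤ x)) = true) := by
              rw [htrL]
              simp only [List.all_append, Bool.and_eq_true]
              intro hc
              exact hall hc.1
            show pvSelKeep (0 + 1) (x :: (xs ++ [d])) = pvBump (pvSelKeep (0 + 1) (x :: xs)) d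
            rw [pvSelKeep, if_neg hLne, if_neg hcL, ih (0 + 1) d hk1]
            rw [pvSelKeep, if_neg h1, if_neg (by simpa using hall)]
        | succ j =>
          -- keep j+2 digits; the appended window is W ++ [w]
          set q : Nat := xs.length - (j + 1) with hqdef
          have hq1 : 1 ≤ q := by omega
          have hqlen : q + (j + 1) = xs.length := by omega
          obtain ⟨w, R', hR⟩ : ∃ w R', xs.drop q = w :: R' := by
            have hL : (xs.drop q).length = j + 1 := by simp; omega
            cases hD : xs.drop q with
            | nil => rw [hD] at hL; simp at hL
            | cons a b => exact ⟨a, b, rfl⟩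
          set W : List Int := xs.take q with hWdef
          have hxs : xs = W ++ w :: R' := by rw [hWdef, ← hR]; exact (List.take_append_drop q xs).symm
          have hWlen : W.length = q := by rw [hWdef]; simp; omega
          have hR'len : R'.length = j := by
            have hL : (xs.drop q).length = j + 1 := by simp; omega
            rw [hR] at hL; simpa using hL
          have htkK : xs.take (xs.length - (j + 1)) = W := rfl
          have hWw : xs.take (q + 1) = W ++ [w] := by
            conv_lhs => rw [hxs]
            rw [show q + 1 = W.length + 1 by rw [hWlen]]
            exact pvTakeSucc W w R'
          have hWDtk : (xs ++ [d]).take ((xs ++ [d]).length - (j + 1)) = W ++ [w] := by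
            have h2 : (xs ++ [d]).length - (j + 1) = q + 1 := by simp; omega
            rw [h2, List.take_append_of_le_length (by omega), hWw]
          by_cases hfW : W.all (fun y => decide (y ≤ x)) = true
          · by_cases hwx : w ≤ x
            · -- head kept on both sides
              obtain ⟨u, h, v, hxseq, hulen, hwin, hsel⟩ := pvSelKeep_headDecomp xs j (by omega)
              have hhx : h ≤ x := by
                have hmem : h ∈ xs.take (q + 1) := by
                  rw [hxseq]
                  exact pvMemTake u h v (q + 1) (by omega)
                rw [hWw] at hmem
                rcases List.mem_append.mp hmem with hm | hm
                · have := List.all_eq_true.mp hfW h hm; simpa using this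
                · simp at hm; omega
              have hcL : ((W ++ [w]).all (fun y => decide (y ≤ x)) = true) := by
                simp only [List.all_append, Bool.and_eq_true]
                exact ⟨hfW, by simpa using hwx⟩
              show pvSelKeep (j + 1 + 1) (x :: (xs ++ [d])) = pvBump (pvSelKeep (j + 1 + 1) (x :: xs)) d
              rw [pvSelKeep, if_neg hLne, hWDtk, if_pos hcL, ih (j + 1) d (by omega), hsel]
              rw [pvSelKeep, if_neg h1, htkK, if_pos hfW, hsel, pvBump_cons_of_le _ _ hhx]
            · -- x < w : head dropped on the left, bumped away on the right
              have hxw : x < w := by omega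
              obtain ⟨u2, h2, v2, hxseq2, hulen2, hwin2, hsel2⟩ := pvSelKeep_headDecomp xs j (by omega)
              have hwh2 : w ≤ h2 := by
                apply hwin2
                rw [show xs.length - j = q + 1 by omega, hWw]
                simp
              obtain ⟨u3, M, v3, hxseq3, hulen3, hwin3, hsel3⟩ := pvSelKeep_headDecomp xs (j + 1) (by omega)
              have hu3q : u3.length < q := by omega
              have hMx : M ≤ x := by
                have hMW : M ∈ W := by
                  rw [hWdef, hxseq3]
                  exact pvMemTake u3 M v3 q hu3q
                have := List.all_eq_true.mp hfW M hMW; simpa using this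
              have hv3 : v3 = W.drop (u3.length + 1) ++ w :: R' := by
                have ha : xs.drop (u3.length + 1) = v3 := by
                  rw [hxseq3, List.drop_append]
                  simp
                have hb2 : xs.drop (u3.length + 1) = W.drop (u3.length + 1) ++ w :: R' := by
                  conv_lhs => rw [hxs]
                  exact List.drop_append_of_le_length (by omega)
                rw [← ha, hb2]
              have hBskip : pvSelKeep (j + 1) xs = pvSelKeep (j + 1) (w :: R') := by
                conv_lhs => rw [hxs]
                refine pvSelKeep_skipLow W (j + 1) w R' (by omega) ?_
                intro y hy
                have := List.all_eq_true.mp hfW y hy; simp at this; omega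
              have hCskip : pvSelKeep (j + 1) v3 = pvSelKeep (j + 1) (w :: R') := by
                rw [hv3]
                refine pvSelKeep_skipLow _ (j + 1) w R' (by omega) ?_
                intro y hy
                have hyW : y ∈ W := List.mem_of_mem_drop hy
                have := List.all_eq_true.mp hfW y hyW; simp at this; omega
              have hWR : pvSelKeep (j + 1) (w :: R') = h2 :: pvSelKeep j v2 := hBskip ▸ hsel2
              have hcL : ¬ ((W ++ [w]).all (fun y => decide (y ≤ x)) = true) := by
                simp only [List.all_append, Bool.and_eq_true]
                intro hc
                have := hc.2; simp at this; omega
              show pvSelKeep (j + 1 + 1) (x :: (xs ++ [d])) = pvBump (pvSelKeep (j + 1 + 1) (x :: xs)) d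
              rw [pvSelKeep, if_neg hLne, hWDtk, if_neg hcL, ih (j + 1 + 1) d hk1, hsel3, hCskip, hWR,
                pvBump_cons_of_lt _ _ (by omega)]
              rw [pvSelKeep, if_neg h1, htkK, if_pos hfW, hsel2, pvBump_cons_of_lt _ _ (by omega)]
          · -- head dropped on both sides
            have hcL : ¬ ((W ++ [w]).all (fun y => decide (y ≤ x)) = true) := by
              simp only [List.all_append, Bool.and_eq_true]
              intro hc
              exact hfW hc.1
            show pvSelKeep (j + 1 + 1) (x :: (xs ++ [d])) = pvBump (pvSelKeep (j + 1 + 1) (x :: xs)) d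
            rw [pvSelKeep, if_neg hLne, hWDtk, if_neg hcL, ih (j + 1 + 1) d hk1]
            rw [pvSelKeep, if_neg h1, htkK, if_neg hfW]

-- A's inner scan computes pvBump on a length-12 buffer
lemma pvAScan_bridge (b : List Int) (d : Int) (hb : b.length = 12) :
    ∀ (n i : Nat), i + n = 12 → pvAScan b d i = b.take i ++ pvBump (b.drop i) d := by
  intro n
  induction n with
  | zero =>
    intro i hi
    obtain rfl : i = 12 := by omega
    rw [pvAScan, dif_neg (by omega), List.take_of_length_le (by omega),
      List.drop_eq_nil_of_le (by omega), pvBump, List.append_nil]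
  | succ n ihn =>
    intro i hi
    have hilt : i < 12 := by omega
    have hib : i < b.length := by omega
    have hgi : PySem.List.pyGet? b (i : Int) = some b[i] := by
      rw [PySem.List.pyGet?_natCast, List.getElem?_eq_getElem hib]
    have hdropi : b.drop i = b[i] :: b.drop (i + 1) := List.drop_eq_getElem_cons hib
    rw [pvAScan, dif_pos hilt]
    by_cases h11 : i = 11
    · subst h11
      have hdrop12 : b.drop 12 = [] := List.drop_eq_nil_of_le (by omega)
      have hdrop11 : b.drop 11 = [b[11]] := by rw [hdropi, hdrop12]
      simp only [if_neg (by omega : ¬ (11 : Nat) ≠ 11), hgi, Option.getD_some]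
      by_cases hlt : b[11] < d
      · rw [if_pos hlt, List.eraseIdx_eq_take_drop_succ, hdrop12, List.append_nil,
          hdrop11, pvBump, if_pos hlt]
      · rw [if_neg hlt, pvAScan, dif_neg (by omega), hdrop11, pvBump, if_neg hlt,
          List.take_concat_get' b 11 hib, List.take_of_length_le (by omega)]
    · have hi1b : i + 1 < b.length := by omega
      have hgi1 : PySem.List.pyGet? b ((i : Int) + 1) = some b[i + 1] := by
        rw [show ((i : Int) + 1) = (((i + 1 : Nat)) : Int) by push_cast; ring,
          PySem.List.pyGet?_natCast, List.getElem?_eq_getElem hi1b]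
      have hdropi1 : b.drop (i + 1) = b[i + 1] :: b.drop (i + 2) := List.drop_eq_getElem_cons hi1b
      simp only [if_pos h11, hgi, hgi1, Option.getD_some]
      by_cases hlt : b[i] < b[i + 1]
      · rw [if_pos hlt, List.eraseIdx_eq_take_drop_succ, hdropi, hdropi1,
          pvBump_cons_of_lt _ _ hlt, List.append_assoc]
      · rw [if_neg hlt, ihn (i + 1) (by omega), hdropi, hdropi1,
          pvBump_cons_of_le _ _ (by omega), ← hdropi1,
          ← List.take_concat_get' b i hib, List.append_assoc]
        rfl

lemma pvFold_eq (line : List Int) :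
    line.foldl (fun b d => pvAScan b d 0) (List.replicate 12 0)
      = pvSelKeep 12 (List.replicate 12 0 ++ line) := by
  induction line using List.reverseRecOn with
  | nil =>
    rw [List.foldl_nil, List.append_nil, pvSelKeep_of_length_eq 12 _ (by simp)]
  | append_singleton l d ihl =>
    rw [List.foldl_append, List.foldl_cons, List.foldl_nil, ihl]
    have hb : (pvSelKeep 12 (List.replicate 12 0 ++ l)).length = 12 :=
      pvSelKeep_length _ 12 (by simp)
    rw [pvAScan_bridge _ d hb 12 0 rfl, List.take_zero, List.drop_zero, List.nil_append,
      ← pvSelKeep_step _ 12 d (by simp), ← List.append_assoc]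

-- ===== VERDICT (by name: the statement is the Claim_ definition above) =====
theorem partB_serial_one_line_spec : Claim_equal_partB_serial_one_line := by
  intro line _
  unfold Spec_partB_serial_one_line partB_serial_one_line partB_serial_one_line_alt
  rw [pvFold_eq]
  have hlen : (pvSelKeep 12 (List.replicate 12 0 ++ line)).length = 12 := by
    apply pvSelKeep_length; simp
  generalize pvSelKeep 12 (List.replicate 12 0 ++ line) = buf at hlen ⊢
  rw [show ((12 : Int)) = ((buf.length : Nat) : Int) by rw [hlen]; rfl]
  rw [PySem.List.foldl_pyRange_zero_pyGetD']
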